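-- pv_equiv track=rewrite | github.com/dimakor/AoC | aoc06/aoc06.py | part1
-- ===== SOURCE A (Python) =====
-- def part1(data):
--     """Solve part 1"""
--     dirx = 0
--     diry = -1
--     obstacles, guardx, guardy, x, y = data
--     positions = set()
--     positions.add((guardx, guardy))
--     while True:
--         if (guardx + dirx, guardy + diry) in obstacles:
--             dirx, diry = -diry, dirx
--             continue
--         guardx += dirx
--         guardy += diry
--         if (guardx < 0) or (guardy < 0) or (guardx > x) or (guardy > y):
--             break
--         positions.add((guardx, guardy))
--     return len(positions), positions
-- ===== SOURCE B (Python) =====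
-- def part1(data):
--     """Solve part 1 by jumping along straight segments to the next obstacle or the border"""
--     obstacles, gx, gy, x, y = data
--     dx, dy = 0, -1
--     seen = {(gx, gy)}
--     while True:
--         # distances to obstacles ahead on the current line of travel
--         if dx == 0:
--             dists = [(oy - gy) * dy for ox, oy in obstacles if ox == gx and (oy - gy) * dy > 0]
--         else:
--             dists = [(ox - gx) * dx for ox, oy in obstacles if oy == gy and (ox - gx) * dx > 0]
--         # steps remaining before the walk leaves the grid
--         if not (0 <= gx + dx <= x and 0 <= gy + dy <= y):
--             border = 0
--         elif dx == 1:
--             border = x - gx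
--         elif dx == -1:
--             border = gx
--         elif dy == 1:
--             border = y - gy
--         else:
--             border = gy
--         if dists and min(dists) - 1 <= border:
--             t = min(dists)
--             for u in range(1, t):
--                 seen.add((gx + u * dx, gy + u * dy))
--             gx += (t - 1) * dx
--             gy += (t - 1) * dy
--             dx, dy = -dy, dx
--         else:
--             for u in range(1, border + 1):
--                 seen.add((gx + u * dx, gy + u * dy))
--             break
--     return len(seen), seen
-- ===== Notes on version B (the rewrite author's own statement) =====
-- stated objective: alternative
-- what changed: B replaces A's cell-by-cell simulation with a segment-jump walk: each iteration it collects the distances of obstacles on the current line of travel, computes how many steps remain to the grid border, then either adds the whole straight run of cells up to the nearest obstacle and turns, or adds the run to the border and stops; Pre_ excludes only inputs where A's while-loop never terminates.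
import Mathlib
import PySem

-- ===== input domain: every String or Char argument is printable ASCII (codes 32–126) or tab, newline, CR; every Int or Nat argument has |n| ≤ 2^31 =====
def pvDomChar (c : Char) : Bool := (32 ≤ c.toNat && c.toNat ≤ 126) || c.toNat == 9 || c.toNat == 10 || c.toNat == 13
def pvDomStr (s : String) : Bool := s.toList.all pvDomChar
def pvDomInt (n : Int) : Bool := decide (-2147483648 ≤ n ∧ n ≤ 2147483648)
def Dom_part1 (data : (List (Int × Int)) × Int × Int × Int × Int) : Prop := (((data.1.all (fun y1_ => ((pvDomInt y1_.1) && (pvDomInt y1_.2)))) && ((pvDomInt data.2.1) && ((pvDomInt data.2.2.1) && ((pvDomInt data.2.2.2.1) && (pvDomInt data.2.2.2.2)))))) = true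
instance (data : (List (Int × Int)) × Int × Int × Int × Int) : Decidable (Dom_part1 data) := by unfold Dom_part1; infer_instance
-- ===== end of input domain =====

-- B re-implements the guard walk segment-by-segment (jump straight to the nearest obstacle
-- ahead or to the grid border, adding the whole straight segment of visited cells at once)
-- instead of A's cell-by-cell simulation; objective: alternative algorithm, same cost.

-- An upper bound on the number of while-iterations of a terminating run: each iteration
-- starts from a distinct (position, direction) state (a repeat would cycle forever).
def fuelBound (x y : Int) : Nat := 4 * ((x+1).toNat * (y+1).toNat + 1) + 4

-- ===== PORT A =====
def aLoop (obst : List (Int × Int)) (x y : Int) :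
    Nat → Int → Int → Int → Int → PySem.Set (Int × Int) → PySem.Set (Int × Int)
  | 0, _, _, _, _, positions => positions
  | n+1, dirx, diry, guardx, guardy, positions =>
    if (guardx + dirx, guardy + diry) ∈ obst then
      aLoop obst x y n (-diry) dirx guardx guardy positions
    else if guardx + dirx < 0 ∨ guardy + diry < 0 ∨ guardx + dirx > x ∨ guardy + diry > y then
      positions
    else
      aLoop obst x y n dirx diry (guardx + dirx) (guardy + diry)
        (PySem.Set.add positions (guardx + dirx, guardy + diry))

def part1 (data : (List (Int × Int)) × Int × Int × Int × Int) : Int × (List (Int × Int)) :=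
  match data with
  | (obstacles, guardx, guardy, x, y) =>
    let positions : PySem.Set (Int × Int) := PySem.Set.add PySem.Set.empty (guardx, guardy)
    let r := aLoop obstacles x y (fuelBound x y) 0 (-1) guardx guardy positions
    (PySem.List.len r, r)

-- ===== PORT B =====
-- B's per-iteration obstacle-distance list (the two list comprehensions of Source B)
def distsOf (obst : List (Int × Int)) (dx dy gx gy : Int) : List Int :=
  if dx = 0 then
    (obst.filter (fun o => o.1 == gx && decide (0 < (o.2 - gy) * dy))).map (fun o => (o.2 - gy) * dy)
  else
    (obst.filter (fun o => o.2 == gy && decide (0 < (o.1 - gx) * dx))).map (fun o => (o.1 - gx) * dx)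

-- B's steps remaining before the walk leaves the grid (the 'border' if/elif chain of Source B)
def borderOf (x y dx dy gx gy : Int) : Int :=
  if ¬ (0 ≤ gx + dx ∧ gx + dx ≤ x ∧ 0 ≤ gy + dy ∧ gy + dy ≤ y) then 0
  else if dx = 1 then x - gx
  else if dx = -1 then gx
  else if dy = 1 then y - gy
  else gy

def bLoop (obst : List (Int × Int)) (x y : Int) :
    Nat → Int → Int → Int → Int → PySem.Set (Int × Int) → PySem.Set (Int × Int)
  | 0, _, _, _, _, seen => seen
  | n+1, dx, dy, gx, gy, seen =>
    let dists := distsOf obst dx dy gx gy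
    let border := borderOf x y dx dy gx gy
    match PySem.List.min? dists (fun v => v) with
    | some t =>
      if t - 1 ≤ border then
        bLoop obst x y n (-dy) dx (gx + (t-1)*dx) (gy + (t-1)*dy)
          ((PySem.List.pyRange 1 t 1).foldl
            (fun s u => PySem.Set.add s (gx + u * dx, gy + u * dy)) seen)
      else (PySem.List.pyRange 1 (border + 1) 1).foldl
            (fun s u => PySem.Set.add s (gx + u * dx, gy + u * dy)) seen
    | none => (PySem.List.pyRange 1 (border + 1) 1).foldl
            (fun s u => PySem.Set.add s (gx + u * dx, gy + u * dy)) seen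

def part1_alt (data : (List (Int × Int)) × Int × Int × Int × Int) : Int × (List (Int × Int)) :=
  match data with
  | (obstacles, gx, gy, x, y) =>
    let seen : PySem.Set (Int × Int) := PySem.Set.add PySem.Set.empty (gx, gy)
    let r := bLoop obstacles x y (fuelBound x y) 0 (-1) gx gy seen
    (PySem.List.len r, r)

-- ===== PRECONDITION & SPEC =====
-- Position/direction-only step of A's while loop, and the state in which A breaks out.
def preStep (obst : List (Int × Int)) (s : Int × Int × Int × Int) : Int × Int × Int × Int :=
  if (s.2.2.1 + s.1, s.2.2.2 + s.2.1) ∈ obst then (-s.2.1, s.1, s.2.2.1, s.2.2.2)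
  else (s.1, s.2.1, s.2.2.1 + s.1, s.2.2.2 + s.2.1)

-- bounded check that the walk reaches a breaking state (true = A's loop breaks)
def preRun (obst : List (Int × Int)) (x y : Int) : Nat → Int × Int × Int × Int → Bool
  | 0, _ => false
  | n+1, s =>
    if ((s.2.2.1 + s.1, s.2.2.2 + s.2.1) ∉ obst) ∧
        (s.2.2.1 + s.1 < 0 ∨ s.2.2.2 + s.2.1 < 0 ∨ s.2.2.1 + s.1 > x ∨ s.2.2.2 + s.2.1 > y) then
      true
    else preRun obst x y n (preStep obst s)

-- Pre_ excludes exactly the inputs on which A's 'while True' never breaks (the guard is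
-- trapped in a cycle): there Python A diverges and returns nothing.  A terminating run
-- breaks within fuelBound iterations (pigeonhole on (position, direction) states).
def Pre_part1 (data : (List (Int × Int)) × Int × Int × Int × Int) : Prop :=
  preRun data.1 data.2.2.2.1 data.2.2.2.2 (fuelBound data.2.2.2.1 data.2.2.2.2)
    (0, -1, data.2.1, data.2.2.1) = true

instance (data : (List (Int × Int)) × Int × Int × Int × Int) : Decidable (Pre_part1 data) := by
  unfold Pre_part1; infer_instance

def pvWitness_part1 : ((List (Int × Int)) × Int × Int × Int × Int) := ([], 0, 0, 0, 0)

def Spec_part1 (data : (List (Int × Int)) × Int × Int × Int × Int) (out : Int × (List (Int × Int))) : Prop := out = part1_alt data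
instance (data : (List (Int × Int)) × Int × Int × Int × Int) (out : Int × (List (Int × Int))) : Decidable (Spec_part1 data out) := by unfold Spec_part1; infer_instance

-- ===== CLAIM (what is proved, stated in full; the proofs are below) =====
def Claim_equal_part1 : Prop := ∀ (data : (List (Int × Int)) × Int × Int × Int × Int), Dom_part1 data → Pre_part1 data → Spec_part1 data (part1 data)

-- ===== LEMMAS AND PROOFS =====

-- Valid (axis-unit) directions taken by the walk
def validD (dx dy : Int) : Prop :=
  (dx = 0 ∧ dy = -1) ∨ (dx = 1 ∧ dy = 0) ∨ (dx = 0 ∧ dy = 1) ∨ (dx = -1 ∧ dy = 0)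

lemma validD_rot (dx dy : Int) (h : validD dx dy) : validD (-dy) dx := by
  rcases h with ⟨h1, h2⟩ | ⟨h1, h2⟩ | ⟨h1, h2⟩ | ⟨h1, h2⟩ <;> subst h1 <;> subst h2 <;>
    simp [validD]

-- the state in which A's loop breaks
def preExit (obst : List (Int × Int)) (x y : Int) (s : Int × Int × Int × Int) : Prop :=
  (s.2.2.1 + s.1, s.2.2.2 + s.2.1) ∉ obst ∧
  (s.2.2.1 + s.1 < 0 ∨ s.2.2.2 + s.2.1 < 0 ∨ s.2.2.1 + s.1 > x ∨ s.2.2.2 + s.2.1 > y)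

lemma preRun_exit (obst : List (Int × Int)) (x y : Int) :
    ∀ (fuel : Nat) (s : Int × Int × Int × Int), preRun obst x y fuel s = true →
      ∃ m < fuel, preExit obst x y ((preStep obst)^[m] s) := by
  intro fuel
  induction fuel with
  | zero => intro s h; simp [preRun] at h
  | succ n ih =>
    intro s h
    rw [preRun] at h
    split_ifs at h with hc
    · exact ⟨0, by omega, hc⟩
    · obtain ⟨m, hm, he⟩ := ih (preStep obst s) h
      exact ⟨m + 1, by omega, by rw [Function.iterate_succ_apply]; exact he⟩

lemma bLoop_succ (obst : List (Int × Int)) (x y : Int) (n : Nat)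
    (dx dy gx gy : Int) (seen : PySem.Set (Int × Int)) :
    bLoop obst x y (n+1) dx dy gx gy seen =
      (match PySem.List.min? (distsOf obst dx dy gx gy) (fun v => v) with
      | some t =>
        if t - 1 ≤ borderOf x y dx dy gx gy then
          bLoop obst x y n (-dy) dx (gx + (t-1)*dx) (gy + (t-1)*dy)
            ((PySem.List.pyRange 1 t 1).foldl
              (fun s u => PySem.Set.add s (gx + u * dx, gy + u * dy)) seen)
        else (PySem.List.pyRange 1 (borderOf x y dx dy gx gy + 1) 1).foldl
              (fun s u => PySem.Set.add s (gx + u * dx, gy + u * dy)) seen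
      | none => (PySem.List.pyRange 1 (borderOf x y dx dy gx gy + 1) 1).foldl
              (fun s u => PySem.Set.add s (gx + u * dx, gy + u * dy)) seen) := rfl

lemma bLoop_succ_some (obst : List (Int × Int)) (x y : Int) (n : Nat)
    (dx dy gx gy t : Int) (seen : PySem.Set (Int × Int))
    (hmin : PySem.List.min? (distsOf obst dx dy gx gy) (fun v => v) = some t) :
    bLoop obst x y (n+1) dx dy gx gy seen =
      if t - 1 ≤ borderOf x y dx dy gx gy then
        bLoop obst x y n (-dy) dx (gx + (t-1)*dx) (gy + (t-1)*dy)
          ((PySem.List.pyRange 1 t 1).foldl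
            (fun s u => PySem.Set.add s (gx + u * dx, gy + u * dy)) seen)
      else (PySem.List.pyRange 1 (borderOf x y dx dy gx gy + 1) 1).foldl
            (fun s u => PySem.Set.add s (gx + u * dx, gy + u * dy)) seen := by
  rw [bLoop_succ, hmin]

lemma bLoop_succ_none (obst : List (Int × Int)) (x y : Int) (n : Nat)
    (dx dy gx gy : Int) (seen : PySem.Set (Int × Int))
    (hmin : PySem.List.min? (distsOf obst dx dy gx gy) (fun v => v) = none) :
    bLoop obst x y (n+1) dx dy gx gy seen =
      (PySem.List.pyRange 1 (borderOf x y dx dy gx gy + 1) 1).foldl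
        (fun s u => PySem.Set.add s (gx + u * dx, gy + u * dy)) seen := by
  rw [bLoop_succ, hmin]

lemma distsOf_mem (obst : List (Int × Int)) (dx dy gx gy t : Int) (hd : validD dx dy) :
    t ∈ distsOf obst dx dy gx gy ↔ 0 < t ∧ (gx + t * dx, gy + t * dy) ∈ obst := by
  rcases hd with ⟨h1, h2⟩ | ⟨h1, h2⟩ | ⟨h1, h2⟩ | ⟨h1, h2⟩ <;> subst h1 <;> subst h2 <;>
  · rw [distsOf]
    first | rw [if_pos rfl] | rw [if_neg (by norm_num)]
    simp only [List.mem_map, List.mem_filter, Bool.and_eq_true, beq_iff_eq, decide_eq_true_eq]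
    constructor
    · rintro ⟨⟨o1, o2⟩, ⟨ho, he, hp⟩, rfl⟩
      dsimp only at he hp ⊢
      refine ⟨by omega, ?_⟩
      convert ho using 2 <;> omega
    · rintro ⟨hp, ho⟩
      exact ⟨_, ⟨ho, by dsimp only; omega, by dsimp only; omega⟩, by dsimp only; omega⟩

lemma borderOf_nonneg (x y dx dy gx gy : Int) (hd : validD dx dy) :
    0 ≤ borderOf x y dx dy gx gy := by
  rcases hd with ⟨h1, h2⟩ | ⟨h1, h2⟩ | ⟨h1, h2⟩ | ⟨h1, h2⟩ <;> subst h1 <;> subst h2 <;>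
    simp only [borderOf] <;> split_ifs <;> first | omega | exact (‹False›).elim

lemma borderOf_inB (x y dx dy gx gy : Int) (hd : validD dx dy) (u : Int)
    (h1 : 1 ≤ u) (h2 : u ≤ borderOf x y dx dy gx gy) :
    0 ≤ gx + u * dx ∧ gx + u * dx ≤ x ∧ 0 ≤ gy + u * dy ∧ gy + u * dy ≤ y := by
  rcases hd with ⟨ha, hb⟩ | ⟨ha, hb⟩ | ⟨ha, hb⟩ | ⟨ha, hb⟩ <;> subst ha <;> subst hb <;>
    simp only [borderOf] at h2 <;> split_ifs at h2 <;> first | omega | exact (‹False›).elim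

lemma borderOf_out (x y dx dy gx gy : Int) (hd : validD dx dy) :
    gx + (borderOf x y dx dy gx gy + 1) * dx < 0 ∨ gy + (borderOf x y dx dy gx gy + 1) * dy < 0 ∨
    gx + (borderOf x y dx dy gx gy + 1) * dx > x ∨ gy + (borderOf x y dx dy gx gy + 1) * dy > y := by
  rcases hd with ⟨ha, hb⟩ | ⟨ha, hb⟩ | ⟨ha, hb⟩ | ⟨ha, hb⟩ <;> subst ha <;> subst hb <;>
    simp only [borderOf] <;> split_ifs <;> first | omega | exact (‹False›).elim

lemma aLoop_turn (obst : List (Int × Int)) (x y : Int) (n : Nat) (dx dy gx gy : Int)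
    (pos : PySem.Set (Int × Int)) (h : (gx + dx, gy + dy) ∈ obst) :
    aLoop obst x y (n+1) dx dy gx gy pos = aLoop obst x y n (-dy) dx gx gy pos := by
  simp [aLoop, h]

lemma aLoop_move (obst : List (Int × Int)) (x y : Int) (n : Nat) (dx dy gx gy : Int)
    (pos : PySem.Set (Int × Int)) (h1 : (gx + dx, gy + dy) ∉ obst)
    (h2 : ¬ (gx + dx < 0 ∨ gy + dy < 0 ∨ gx + dx > x ∨ gy + dy > y)) :
    aLoop obst x y (n+1) dx dy gx gy pos =
      aLoop obst x y n dx dy (gx + dx) (gy + dy)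
        (PySem.Set.add pos (gx + dx, gy + dy)) := by
  simp [aLoop, h1, h2]

lemma aLoop_exit (obst : List (Int × Int)) (x y : Int) (n : Nat) (dx dy gx gy : Int)
    (pos : PySem.Set (Int × Int)) (h1 : (gx + dx, gy + dy) ∉ obst)
    (h2 : gx + dx < 0 ∨ gy + dy < 0 ∨ gx + dx > x ∨ gy + dy > y) :
    aLoop obst x y (n+1) dx dy gx gy pos = pos := by
  simp [aLoop, h1, h2]

-- k unblocked in-bounds moves of A = one jump plus a fold over the visited cells
lemma aLoop_run (obst : List (Int × Int)) (x y : Int) (k : Nat) :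
    ∀ (n : Nat) (dx dy gx gy : Int) (pos : PySem.Set (Int × Int)),
    (∀ u : Int, 1 ≤ u → u ≤ (k : Int) →
      (gx + u * dx, gy + u * dy) ∉ obst ∧
      (0 ≤ gx + u * dx ∧ gx + u * dx ≤ x ∧ 0 ≤ gy + u * dy ∧ gy + u * dy ≤ y)) →
    aLoop obst x y (n + k) dx dy gx gy pos =
      aLoop obst x y n dx dy (gx + (k : Int) * dx) (gy + (k : Int) * dy)
        ((PySem.List.pyRange 1 ((k : Int) + 1) 1).foldl
          (fun s u => PySem.Set.add s (gx + u * dx, gy + u * dy)) pos) := by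
  induction k with
  | zero =>
    intro n dx dy gx gy pos _
    rw [PySem.List.pyRange_one_eq_nil (by omega)]
    simp
  | succ k ih =>
    intro n dx dy gx gy pos h
    have hstep := h ((k : Int) + 1) (by omega) (by push_cast; omega)
    have e1 : gx + (k : Int) * dx + dx = gx + ((k : Int) + 1) * dx := by ring
    have e2 : gy + (k : Int) * dy + dy = gy + ((k : Int) + 1) * dy := by ring
    have hrec : n + (k + 1) = (n + 1) + k := by omega
    rw [hrec, ih (n+1) dx dy gx gy pos
      (fun u h1 h2 => h u h1 (by push_cast; omega))]
    rw [aLoop_move obst x y n dx dy (gx + (k : Int) * dx) (gy + (k : Int) * dy) _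
      (by rw [e1, e2]; exact hstep.1) (by rw [e1, e2]; omega)]
    rw [e1, e2]
    congr 1
    push_cast
    rw [PySem.List.pyRange_one_succ_right (by omega : (1 : Int) ≤ (k : Int) + 1)]
    rw [List.foldl_append]
    simp

-- the position-only step function makes the same k moves
lemma preStep_moves (obst : List (Int × Int)) (k : Nat) :
    ∀ (dx dy gx gy : Int),
    (∀ u : Int, 1 ≤ u → u ≤ (k : Int) → (gx + u * dx, gy + u * dy) ∉ obst) →
    (preStep obst)^[k] (dx, dy, gx, gy) = (dx, dy, gx + (k : Int) * dx, gy + (k : Int) * dy) := by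
  induction k with
  | zero => intro dx dy gx gy _; simp
  | succ k ih =>
    intro dx dy gx gy h
    rw [Function.iterate_succ_apply', ih dx dy gx gy (fun u h1 h2 => h u h1 (by push_cast; omega))]
    have e1 : gx + (k : Int) * dx + dx = gx + ((k : Int) + 1) * dx := by ring
    have e2 : gy + (k : Int) * dy + dy = gy + ((k : Int) + 1) * dy := by ring
    have hstep := h ((k : Int) + 1) (by omega) (by push_cast; omega)
    rw [← e1, ← e2] at hstep
    simp only [preStep, if_neg hstep]
    push_cast
    rw [Prod.mk.injEq, Prod.mk.injEq, Prod.mk.injEq]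
    refine ⟨rfl, rfl, by omega, by omega⟩

lemma preExit_iff (obst : List (Int × Int)) (x y dx dy a b : Int) :
    preExit obst x y (dx, dy, a, b) ↔
      ((a + dx, b + dy) ∉ obst ∧ (a + dx < 0 ∨ b + dy < 0 ∨ a + dx > x ∨ b + dy > y)) :=
  Iff.rfl

lemma exit_shift (obst : List (Int × Int)) (x y : Int) (k N : Nat) (s : Int × Int × Int × Int)
    (hne : ∀ m' : Nat, m' < k → ¬ preExit obst x y ((preStep obst)^[m'] s))
    (hex : ∃ m ≤ N, preExit obst x y ((preStep obst)^[m] s)) :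
    k ≤ N ∧ ∃ m ≤ N - k, preExit obst x y ((preStep obst)^[m] ((preStep obst)^[k] s)) := by
  obtain ⟨m, hm, he⟩ := hex
  have hk : k ≤ m := by
    by_contra hcon
    exact hne m (by omega) he
  refine ⟨by omega, m - k, by omega, ?_⟩
  rw [← Function.iterate_add_apply, show m - k + k = m by omega]
  exact he

-- A's walk up to the border exit, when no obstacle lies at distance 1..border+1
lemma exit_case (obst : List (Int × Int)) (x y : Int) (N fa : Nat) (dx dy gx gy : Int)
    (pos : PySem.Set (Int × Int)) (hd : validD dx dy)
    (hno : ∀ u : Int, 1 ≤ u → u ≤ borderOf x y dx dy gx gy + 1 → (gx + u * dx, gy + u * dy) ∉ obst)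
    (hex : ∃ m ≤ N, preExit obst x y ((preStep obst)^[m] (dx, dy, gx, gy)))
    (hfa : N < fa) :
    aLoop obst x y fa dx dy gx gy pos =
      (PySem.List.pyRange 1 (borderOf x y dx dy gx gy + 1) 1).foldl
        (fun s u => PySem.Set.add s (gx + u * dx, gy + u * dy)) pos := by
  set db := borderOf x y dx dy gx gy with hdb
  have hdb0 : 0 ≤ db := borderOf_nonneg x y dx dy gx gy hd
  set k := db.toNat with hkdef
  have hkc : (k : Int) = db := Int.toNat_of_nonneg hdb0
  have hbnd : ∀ u : Int, 1 ≤ u → u ≤ db →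
      0 ≤ gx + u * dx ∧ gx + u * dx ≤ x ∧ 0 ≤ gy + u * dy ∧ gy + u * dy ≤ y :=
    fun u h1 h2 => borderOf_inB x y dx dy gx gy hd u h1 h2
  have hne : ∀ m' : Nat, m' < k → ¬ preExit obst x y ((preStep obst)^[m'] (dx, dy, gx, gy)) := by
    intro m' hm'
    have hst := preStep_moves obst m' dx dy gx gy
      (fun u h1 h2 => hno u h1 (by omega))
    rw [hst, preExit_iff]
    rintro ⟨-, hout⟩
    have e1 : gx + (m' : Int) * dx + dx = gx + ((m' : Int) + 1) * dx := by ring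
    have e2 : gy + (m' : Int) * dy + dy = gy + ((m' : Int) + 1) * dy := by ring
    rw [e1, e2] at hout
    have := hbnd ((m' : Int) + 1) (by omega) (by omega)
    omega
  obtain ⟨hkN, -⟩ := exit_shift obst x y k N _ hne hex
  have hfk : fa = (fa - k - 1) + 1 + k := by omega
  rw [hfk, aLoop_run obst x y k (fa - k - 1 + 1) dx dy gx gy pos
    (fun u h1 h2 => ⟨hno u h1 (by omega), hbnd u h1 (by omega)⟩)]
  rw [aLoop_exit]
  · rw [hkc]
  · have := hno ((k : Int) + 1) (by omega) (by omega)
    have e1 : gx + (k : Int) * dx + dx = gx + ((k : Int) + 1) * dx := by ring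
    have e2 : gy + (k : Int) * dy + dy = gy + ((k : Int) + 1) * dy := by ring
    rw [e1, e2]
    exact this
  · have := borderOf_out x y dx dy gx gy hd
    have e1 : gx + (k : Int) * dx + dx = gx + ((k : Int) + 1) * dx := by ring
    have e2 : gy + (k : Int) * dy + dy = gy + ((k : Int) + 1) * dy := by ring
    rw [e1, e2, hkc]
    omega

lemma main_lemma (obst : List (Int × Int)) (x y : Int) :
    ∀ N : Nat, ∀ (dx dy gx gy : Int) (pos : PySem.Set (Int × Int)) (fa fb : Nat),
    validD dx dy →
    (∃ m ≤ N, preExit obst x y ((preStep obst)^[m] (dx, dy, gx, gy))) →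
    N < fa → N < fb →
    aLoop obst x y fa dx dy gx gy pos = bLoop obst x y fb dx dy gx gy pos := by
  intro N
  induction N using Nat.strong_induction_on with
  | _ N IH =>
  intro dx dy gx gy pos fa fb hd hex hfa hfb
  obtain ⟨fb', rfl⟩ : ∃ fb', fb = fb' + 1 := ⟨fb - 1, by omega⟩
  cases hmin : PySem.List.min? (distsOf obst dx dy gx gy) (fun v => v) with
  | none =>
    rw [bLoop_succ_none obst x y fb' dx dy gx gy pos hmin]
    have hempty : distsOf obst dx dy gx gy = [] := by
      rwa [PySem.List.min?_eq_none_iff] at hmin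
    have hno : ∀ u : Int, 1 ≤ u → u ≤ borderOf x y dx dy gx gy + 1 →
        (gx + u * dx, gy + u * dy) ∉ obst := by
      intro u h1 h2 hin
      have : u ∈ distsOf obst dx dy gx gy :=
        (distsOf_mem obst dx dy gx gy u hd).2 ⟨by omega, hin⟩
      rw [hempty] at this
      exact absurd this (List.not_mem_nil)
    exact exit_case obst x y N fa dx dy gx gy pos hd hno hex hfa
  | some t =>
    have htmem := PySem.List.min?_mem hmin
    have hmin_le := PySem.List.min?_isMin hmin
    obtain ⟨htpos, htobs⟩ := (distsOf_mem obst dx dy gx gy t hd).1 htmem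
    rw [bLoop_succ_some obst x y fb' dx dy gx gy t pos hmin]
    by_cases hle : t - 1 ≤ borderOf x y dx dy gx gy
    · rw [if_pos hle]
      -- turn case: t-1 moves then one turn
      have hnob : ∀ u : Int, 1 ≤ u → u ≤ t - 1 → (gx + u * dx, gy + u * dy) ∉ obst := by
        intro u h1 h2 hin
        have hu : u ∈ distsOf obst dx dy gx gy :=
          (distsOf_mem obst dx dy gx gy u hd).2 ⟨by omega, hin⟩
        have := hmin_le u hu
        simp only at this
        omega
      have hbnd : ∀ u : Int, 1 ≤ u → u ≤ t - 1 →
          0 ≤ gx + u * dx ∧ gx + u * dx ≤ x ∧ 0 ≤ gy + u * dy ∧ gy + u * dy ≤ y :=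
        fun u h1 h2 => borderOf_inB x y dx dy gx gy hd u h1 (by omega)
      set k := (t - 1).toNat with hkdef
      have hkc : (k : Int) = t - 1 := Int.toNat_of_nonneg (by omega)
      have hne : ∀ m' : Nat, m' < k + 1 →
          ¬ preExit obst x y ((preStep obst)^[m'] (dx, dy, gx, gy)) := by
        intro m' hm'
        have hst := preStep_moves obst m' dx dy gx gy
          (fun u h1 h2 => hnob u h1 (by omega))
        rw [hst, preExit_iff]
        have e1 : gx + (m' : Int) * dx + dx = gx + ((m' : Int) + 1) * dx := by ring
        have e2 : gy + (m' : Int) * dy + dy = gy + ((m' : Int) + 1) * dy := by ring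
        by_cases hmk : m' = k
        · rintro ⟨hc1, -⟩
          apply hc1
          rw [e1, e2]
          have : (m' : Int) + 1 = t := by omega
          rw [this]
          exact htobs
        · rintro ⟨-, hout⟩
          rw [e1, e2] at hout
          have := hbnd ((m' : Int) + 1) (by omega) (by omega)
          omega
      obtain ⟨hkN, hex'⟩ := exit_shift obst x y (k + 1) N _ hne hex
      -- A side: k moves then a turn
      have hfk : fa = ((fa - k - 1) + 1) + k := by omega
      rw [hfk, aLoop_run obst x y k (fa - k - 1 + 1) dx dy gx gy pos
        (fun u h1 h2 => ⟨hnob u h1 (by omega), hbnd u h1 (by omega)⟩)]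
      rw [aLoop_turn]
      swap
      · have e1 : gx + (k : Int) * dx + dx = gx + ((k : Int) + 1) * dx := by ring
        have e2 : gy + (k : Int) * dy + dy = gy + ((k : Int) + 1) * dy := by ring
        rw [e1, e2]
        have : (k : Int) + 1 = t := by omega
        rw [this]
        exact htobs
      -- identify the shifted state with B's jump target and apply the IH
      have hstate : (preStep obst)^[k + 1] (dx, dy, gx, gy) =
          (-dy, dx, gx + (k : Int) * dx, gy + (k : Int) * dy) := by
        rw [Function.iterate_succ_apply',
          preStep_moves obst k dx dy gx gy (fun u h1 h2 => hnob u h1 (by omega))]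
        have e1 : gx + (k : Int) * dx + dx = gx + ((k : Int) + 1) * dx := by ring
        have e2 : gy + (k : Int) * dy + dy = gy + ((k : Int) + 1) * dy := by ring
        have hb : (gx + (k : Int) * dx + dx, gy + (k : Int) * dy + dy) ∈ obst := by
          rw [e1, e2, show (k : Int) + 1 = t by omega]
          exact htobs
        simp only [preStep, hb, if_pos]
      rw [hstate] at hex'
      have hgoal := IH (N - (k + 1)) (by omega) (-dy) dx
        (gx + (k : Int) * dx) (gy + (k : Int) * dy)
        ((PySem.List.pyRange 1 ((k : Int) + 1) 1).foldl
          (fun s u => PySem.Set.add s (gx + u * dx, gy + u * dy)) pos)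
        (fa - k - 1) fb' (validD_rot dx dy hd) hex' (by omega) (by omega)
      rw [hgoal, hkc, show t - 1 + 1 = t by ring]
    · rw [if_neg hle]
      have hno : ∀ u : Int, 1 ≤ u → u ≤ borderOf x y dx dy gx gy + 1 →
          (gx + u * dx, gy + u * dy) ∉ obst := by
        intro u h1 h2 hin
        have hu : u ∈ distsOf obst dx dy gx gy :=
          (distsOf_mem obst dx dy gx gy u hd).2 ⟨by omega, hin⟩
        have := hmin_le u hu
        simp only at this
        omega
      exact exit_case obst x y N fa dx dy gx gy pos hd hno hex hfa

-- ===== VERDICT (by name: the statement is the Claim_ definition above) =====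
theorem part1_spec : Claim_equal_part1 := by
  intro data _ hpre
  obtain ⟨obst, gx, gy, x, y⟩ := data
  unfold Pre_part1 at hpre
  dsimp only at hpre
  obtain ⟨n, hn, he⟩ := preRun_exit obst x y _ _ hpre
  have hF : 0 < fuelBound x y := by unfold fuelBound; omega
  have h := main_lemma obst x y (fuelBound x y - 1) 0 (-1) gx gy
    (PySem.Set.add PySem.Set.empty (gx, gy)) (fuelBound x y) (fuelBound x y)
    (Or.inl ⟨rfl, rfl⟩) ⟨n, by omega, he⟩ (by omega) (by omega)
  unfold Spec_part1
  simp only [part1, part1_alt]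
  rw [h]
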